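-- pv_equiv track=rewrite | github.com/MathiasPede/Fast-Time-Series-Clustering | fasttsclustering/helper.py | _distance_matrix_length
-- ===== SOURCE A (Python) =====
-- def _distance_matrix_length(block, nb_series):
--     if block is not None:
--         block_rb = block[0][0]
--         block_re = block[0][1]
--         block_cb = block[1][0]
--         block_ce = block[1][1]
--         length = 0
--         for ri in range(block_rb, block_re):
--             if block_cb <= ri:
--                 if block_ce > ri:
--                     length += (block_ce - ri - 1)
--             else:
--                 if block_ce > ri:
--                     length += (block_ce - block_cb)
--     else:
--         length = int(nb_series * (nb_series - 1) / 2)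
--     return length
-- ===== SOURCE B (Python) =====
-- def _distance_matrix_length(block, nb_series):
--     if block is None:
--         return nb_series * (nb_series - 1) // 2
--     (rb, re, cb, ce) = (block[0][0], block[0][1], block[1][0], block[1][1])
--     # rows ri in [max(rb,cb), min(re,ce)) contribute ce - ri - 1: arithmetic series
--     lo = max(rb, cb)
--     hi = min(re, ce)
--     series = (hi - lo) * (2 * ce - 1 - lo - hi) // 2 if lo < hi else 0
--     # rows ri in [rb, min(re,cb,ce)) each contribute ce - cb
--     left = min(re, cb, ce)
--     flat = (left - rb) * (ce - cb) if rb < left else 0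
--     return series + flat
-- ===== Notes on version B (the rewrite author's own statement) =====
-- stated objective: faster
-- what changed: Replaces the per-row loop over range(block_rb, block_re) with a closed-form O(1) partition of the rows into an arithmetic-series part and a constant part, and uses exact integer // instead of float division in the block=None branch.
-- intended difference: For block=None with nb_series*(nb_series-1) > 2**53, A returns int(nb_series*(nb_series-1)/2) whose float division rounds the product to 53 bits, while B returns the exact triangular count nb_series*(nb_series-1)//2, which is the intended value. — e.g. on _distance_matrix_length(none, 189812532): A returns 18014398557219248, B returns 18014398557219246
import Mathlib
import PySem

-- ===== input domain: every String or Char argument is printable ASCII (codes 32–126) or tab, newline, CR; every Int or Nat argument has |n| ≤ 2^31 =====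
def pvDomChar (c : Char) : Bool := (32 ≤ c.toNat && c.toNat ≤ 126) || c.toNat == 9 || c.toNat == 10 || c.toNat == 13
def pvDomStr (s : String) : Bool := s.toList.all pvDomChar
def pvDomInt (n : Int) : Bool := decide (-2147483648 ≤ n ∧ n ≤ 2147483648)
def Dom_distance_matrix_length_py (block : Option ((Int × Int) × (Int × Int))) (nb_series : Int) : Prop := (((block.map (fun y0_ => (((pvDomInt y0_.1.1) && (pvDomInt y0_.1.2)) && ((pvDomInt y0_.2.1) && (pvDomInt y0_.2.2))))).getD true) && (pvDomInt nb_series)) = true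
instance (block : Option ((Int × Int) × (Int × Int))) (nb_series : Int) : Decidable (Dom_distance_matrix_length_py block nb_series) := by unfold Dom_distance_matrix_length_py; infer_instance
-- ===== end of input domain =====

-- B replaces A's per-row loop by a closed-form arithmetic-series formula (O(1) instead of
-- O(block_re - block_rb)) and uses exact integer // in the no-block branch where A's
-- float division loses precision for huge nb_series.

-- ===== PORT A =====
-- exact model of CPython float(m) for 0 ≤ m: round to the nearest IEEE-754 double
-- (53-bit significand, ties to even), returned as the integer it denotes
-- bit length of n (exact for n < 2^64; structural recursion on 64 fuel steps so that
-- the kernel can evaluate it)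
def pvBits : Nat → Nat → Nat
  | 0, _ => 0
  | fuel + 1, n => if n = 0 then 0 else pvBits fuel (n / 2) + 1

def pvRoundDouble (n : Nat) : Nat :=
  if n ≤ 2 ^ 53 then n
  else
    if 2 ^ (pvBits 64 n - 53 - 1) < n % 2 ^ (pvBits 64 n - 53)
        ∨ (n % 2 ^ (pvBits 64 n - 53) = 2 ^ (pvBits 64 n - 53 - 1)
            ∧ (n / 2 ^ (pvBits 64 n - 53)) % 2 = 1)
    then (n / 2 ^ (pvBits 64 n - 53) + 1) * 2 ^ (pvBits 64 n - 53)
    else (n / 2 ^ (pvBits 64 n - 53)) * 2 ^ (pvBits 64 n - 53)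

def distance_matrix_length_py (block : Option ((Int × Int) × (Int × Int))) (nb_series : Int) : Int :=
  match block with
  | some b =>
    let block_rb := b.1.1
    let block_re := b.1.2
    let block_cb := b.2.1
    let block_ce := b.2.2
    (PySem.List.pyRange block_rb block_re 1).foldl
      (fun length ri =>
        if block_cb ≤ ri then
          if block_ce > ri then length + (block_ce - ri - 1) else length
        else
          if block_ce > ri then length + (block_ce - block_cb) else length) 0
  | none =>
    -- int(nb_series * (nb_series - 1) / 2): the (nonnegative) product is converted to a
    -- double (pvRoundDouble, exact model), the division by 2 is exact in binary, and
    -- int() truncates toward zero (Int.tdiv)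
    Int.tdiv ((pvRoundDouble (nb_series * (nb_series - 1)).toNat : Nat) : Int) 2

-- ===== PORT B =====
def distance_matrix_length_py_alt (block : Option ((Int × Int) × (Int × Int))) (nb_series : Int) : Int :=
  match block with
  | some b =>
    let rb := b.1.1
    let re := b.1.2
    let cb := b.2.1
    let ce := b.2.2
    -- rows ri in [max(rb,cb), min(re,ce)) contribute ce - ri - 1: arithmetic series
    let lo := max rb cb
    let hi := min re ce
    let series := if lo < hi then PySem.Int.floordiv ((hi - lo) * (2 * ce - 1 - lo - hi)) 2 else 0
    -- rows ri in [rb, min(re,cb,ce)) each contribute ce - cb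
    let left := min re (min cb ce)
    let flat := if rb < left then (left - rb) * (ce - cb) else 0
    series + flat
  | none => PySem.Int.floordiv (nb_series * (nb_series - 1)) 2

-- ===== PRECONDITION & SPEC =====
-- For block = None with m = nb_series*(nb_series-1) not exactly representable as an IEEE
-- double (no e < 64 with 2^e | m and m < 2^53 * 2^e), A returns int(m/2), which rounds m to
-- 53 significant bits, while B returns the exact triangular count m//2, the intended value.
def D_distance_matrix_length_py (block : Option ((Int × Int) × (Int × Int))) (nb_series : Int) : Prop :=
  block = none ∧
    ¬ ∃ e ∈ Finset.range 64,
        ((2 : Int) ^ e ∣ nb_series * (nb_series - 1) ∧ nb_series * (nb_series - 1) < 2 ^ 53 * 2 ^ e)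
instance (block : Option ((Int × Int) × (Int × Int))) (nb_series : Int) : Decidable (D_distance_matrix_length_py block nb_series) := by unfold D_distance_matrix_length_py; infer_instance

def Spec_distance_matrix_length_py (block : Option ((Int × Int) × (Int × Int))) (nb_series : Int) (out : Int) : Prop := ¬ D_distance_matrix_length_py block nb_series → out = distance_matrix_length_py_alt block nb_series
instance (block : Option ((Int × Int) × (Int × Int))) (nb_series : Int) (out : Int) : Decidable (Spec_distance_matrix_length_py block nb_series out) := by unfold Spec_distance_matrix_length_py; infer_instance

def pvDiffWitness_distance_matrix_length_py : (Option ((Int × Int) × (Int × Int))) × Int := (none, 189812532)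
def pvDiffWitnessOut_distance_matrix_length_py : Int × Int := (18014398557219248, 18014398557219246)

-- ===== CLAIM (what is proved, stated in full; the proofs are below) =====
def Claim_unchanged_distance_matrix_length_py : Prop := ∀ (block : Option ((Int × Int) × (Int × Int))) (nb_series : Int), Dom_distance_matrix_length_py block nb_series → Spec_distance_matrix_length_py block nb_series (distance_matrix_length_py block nb_series)
def Claim_changed_distance_matrix_length_py : Prop := Dom_distance_matrix_length_py (pvDiffWitness_distance_matrix_length_py.1) (pvDiffWitness_distance_matrix_length_py.2) ∧ D_distance_matrix_length_py (pvDiffWitness_distance_matrix_length_py.1) (pvDiffWitness_distance_matrix_length_py.2) ∧ distance_matrix_length_py (pvDiffWitness_distance_matrix_length_py.1) (pvDiffWitness_distance_matrix_length_py.2) = pvDiffWitnessOut_distance_matrix_length_py.1 ∧ distance_matrix_length_py_alt (pvDiffWitness_distance_matrix_length_py.1) (pvDiffWitness_distance_matrix_length_py.2) = pvDiffWitnessOut_distance_matrix_length_py.2 ∧ pvDiffWitnessOut_distance_matrix_length_py.1 ≠ pvDiffWitnessOut_distance_matrix_length_py.2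
def Claim_exact_distance_matrix_length_py : Prop := ∀ (block : Option ((Int × Int) × (Int × Int))) (nb_series : Int), Dom_distance_matrix_length_py block nb_series → D_distance_matrix_length_py block nb_series → distance_matrix_length_py block nb_series ≠ distance_matrix_length_py_alt block nb_series

-- ===== LEMMAS AND PROOFS =====

-- doubled closed form for the block branch (no division, so pure arithmetic)
def pvC (rb re cb ce : Int) : Int :=
  (if max rb cb < min re ce then (min re ce - max rb cb) * (2 * ce - 1 - max rb cb - min re ce) else 0)
  + (if rb < min re (min cb ce) then 2 * ((min re (min cb ce) - rb) * (ce - cb)) else 0)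

lemma pvC_step (rb re cb ce : Int) (h : rb < re) :
    2 * (if cb ≤ rb then (if ce > rb then ce - rb - 1 else 0) else (if ce > rb then ce - cb else 0))
      + pvC (rb + 1) re cb ce = pvC rb re cb ce := by
  unfold pvC
  rcases le_or_gt cb rb with hc | hc
  · have hM : max rb cb = rb := by omega
    have hM' : max (rb + 1) cb = rb + 1 := by omega
    have hL : ¬ rb < min re (min cb ce) := by omega
    have hL' : ¬ rb + 1 < min re (min cb ce) := by omega
    rw [hM, hM', if_pos hc, if_neg hL, if_neg hL']
    rcases lt_or_ge rb ce with he | he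
    · have hm : rb < min re ce := by omega
      rw [if_pos (by omega : (ce:Int) > rb), if_pos hm]
      rcases lt_or_ge (rb + 1) (min re ce) with hm' | hm'
      · rw [if_pos hm']; ring
      · have : min re ce = rb + 1 := by omega
        rw [if_neg (by omega), this]; ring
    · rw [if_neg (by omega : ¬ (ce:Int) > rb), if_neg (by omega), if_neg (by omega)]; ring
  · have hM : max rb cb = cb := by omega
    have hM' : max (rb + 1) cb = cb := by omega
    rw [hM, hM', if_neg (show ¬ cb ≤ rb by omega)]
    rcases lt_or_ge rb ce with he | he
    · rw [if_pos (show (ce:Int) > rb by omega),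
          if_pos (show rb < min re (min cb ce) by omega)]
      rcases lt_or_ge (rb + 1) (min re (min cb ce)) with hL' | hL'
      · rw [if_pos hL']; ring
      · rw [if_neg (show ¬ rb + 1 < min re (min cb ce) by omega)]
        have h2 : min re (min cb ce) = rb + 1 := by omega
        rw [h2]; ring
    · rw [if_neg (show ¬ rb < min re (min cb ce) by omega),
          if_neg (show ¬ rb + 1 < min re (min cb ce) by omega),
          if_neg (show ¬ (ce:Int) > rb by omega)]
      ring

lemma pv_loop2 (cb ce : Int) : ∀ (n : Nat) (rb re acc : Int), (re - rb).toNat = n →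
    2 * ((PySem.List.pyRange rb re 1).foldl
      (fun length ri =>
        if cb ≤ ri then
          if ce > ri then length + (ce - ri - 1) else length
        else
          if ce > ri then length + (ce - cb) else length) acc)
      = 2 * acc + pvC rb re cb ce := by
  intro n
  induction n with
  | zero =>
    intro rb re acc h0
    have hre : re ≤ rb := by omega
    rw [PySem.List.pyRange_one_eq_nil hre]
    unfold pvC
    rw [if_neg (by omega), if_neg (by omega)]
    simp
  | succ n ih =>
    intro rb re acc h0
    have hlt : rb < re := by omega
    rw [PySem.List.pyRange_one_cons hlt, List.foldl_cons]
    rw [ih (rb + 1) re _ (by omega)]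
    have hg : (if cb ≤ rb then
          if ce > rb then acc + (ce - rb - 1) else acc
        else
          if ce > rb then acc + (ce - cb) else acc)
        = acc + (if cb ≤ rb then (if ce > rb then ce - rb - 1 else 0) else (if ce > rb then ce - cb else 0)) := by
      split_ifs <;> ring
    rw [hg, ← pvC_step rb re cb ce hlt]; ring

lemma pv_even_series (lo hi ce : Int) : Even ((hi - lo) * (2 * ce - 1 - lo - hi)) := by
  rcases Int.even_or_odd (hi - lo) with h | h
  · exact (Int.even_mul).2 (Or.inl h)
  · refine (Int.even_mul).2 (Or.inr ?_)
    rw [Int.odd_iff] at h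
    rw [Int.even_iff]
    omega

lemma pv_alt_double (rb re cb ce : Int) :
    2 * distance_matrix_length_py_alt (some ((rb, re), (cb, ce))) 0 = pvC rb re cb ce := by
  show 2 * ((if max rb cb < min re ce then PySem.Int.floordiv ((min re ce - max rb cb) * (2 * ce - 1 - max rb cb - min re ce)) 2 else 0)
      + (if rb < min re (min cb ce) then (min re (min cb ce) - rb) * (ce - cb) else 0)) = pvC rb re cb ce
  unfold pvC
  have hev := pv_even_series (max rb cb) (min re ce) ce
  rw [Int.even_iff] at hev
  rw [PySem.Int.floordiv_eq_ediv_of_pos (by norm_num)]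
  split_ifs <;> omega

theorem pv_some_eq (rb re cb ce : Int) :
    distance_matrix_length_py (some ((rb, re), (cb, ce))) 0
      = distance_matrix_length_py_alt (some ((rb, re), (cb, ce))) 0 := by
  have hA : 2 * distance_matrix_length_py (some ((rb, re), (cb, ce))) 0 = pvC rb re cb ce := by
    show 2 * ((PySem.List.pyRange rb re 1).foldl _ 0) = pvC rb re cb ce
    rw [pv_loop2 cb ce (re - rb).toNat rb re 0 rfl]; ring
  have hB := pv_alt_double rb re cb ce
  omega

lemma pv_args_irrel (b : (Int × Int) × (Int × Int)) (n m : Int) :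
    distance_matrix_length_py (some b) n = distance_matrix_length_py (some b) m ∧
    distance_matrix_length_py_alt (some b) n = distance_matrix_length_py_alt (some b) m := by
  constructor <;> rfl

-- the product n*(n-1) is nonnegative and even
lemma pv_prod_nonneg (n : Int) : 0 ≤ n * (n - 1) := by nlinarith [sq_nonneg (2 * n - 1)]

lemma pv_prod_even (n : Int) : n * (n - 1) % 2 = 0 := by
  have hev : Even (n * (n - 1)) := by
    have := Int.even_mul_succ_self (n - 1)
    simpa [mul_comm] using this
  exact Int.even_iff.1 hev

lemma pvBits_zero (fuel : Nat) : pvBits fuel 0 = 0 := by cases fuel <;> simp [pvBits]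

-- pvBits is the binary length: 2^(b-1) ≤ n < 2^b (for 0 < n < 2^fuel)
lemma pvBits_bounds : ∀ (fuel n : Nat), n < 2 ^ fuel →
    n < 2 ^ pvBits fuel n ∧ (1 ≤ n → 2 ^ (pvBits fuel n - 1) ≤ n)
  | 0, n, h => by
    have : n = 0 := by omega
    subst this
    simp [pvBits]
  | fuel + 1, n, h => by
    by_cases h0 : n = 0
    · subst h0; simp [pvBits]
    · have hfu : n / 2 < 2 ^ fuel := by
        have : (2:Nat) ^ (fuel + 1) = 2 ^ fuel * 2 := pow_succ 2 fuel
        omega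
      have hrec := pvBits_bounds fuel (n / 2) hfu
      simp only [pvBits, if_neg h0]
      rcases Nat.eq_zero_or_pos (n / 2) with hz | hp
      · have hn1 : n = 1 := by omega
        subst hn1
        rw [hz, pvBits_zero]
        norm_num
      · have hup := hrec.1
        have hlow := hrec.2 hp
        have hb1 : 1 ≤ pvBits fuel (n / 2) := by
          by_contra hb
          have : pvBits fuel (n / 2) = 0 := by omega
          rw [this] at hup
          omega
        have hs : (2:Nat) ^ (pvBits fuel (n / 2) + 1) = 2 ^ pvBits fuel (n / 2) * 2 :=
          pow_succ 2 _
        have hs2 : (2:Nat) ^ pvBits fuel (n / 2) = 2 ^ (pvBits fuel (n / 2) - 1) * 2 := by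
          have := pow_succ 2 (pvBits fuel (n / 2) - 1)
          have he : pvBits fuel (n / 2) - 1 + 1 = pvBits fuel (n / 2) := by omega
          rw [he] at this
          exact this
      
        constructor
        · omega
        · intro _
          have hg : pvBits fuel (n / 2) + 1 - 1 = pvBits fuel (n / 2) := by omega
          rw [hg]
          omega

-- representability as a 53-bit-significand binary float
def pvRep (n : Nat) : Prop := ∃ e, e < 64 ∧ 2 ^ e ∣ n ∧ n < 2 ^ 53 * 2 ^ e

lemma pvRep_of_small {n : Nat} (h : n ≤ 2 ^ 53) (h2 : n % 2 = 0) : pvRep n := by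
  rcases Nat.lt_or_ge n (2 ^ 53) with hlt | hge
  · exact ⟨0, by norm_num, one_dvd n, by simpa using hlt⟩
  · have : n = 2 ^ 53 := by omega
    subst this
    exact ⟨1, by norm_num, ⟨2 ^ 52, by norm_num⟩, by norm_num⟩

lemma pv_round_eq_of_rep {n : Nat} (hn : n < 2 ^ 63) (h : pvRep n) : pvRoundDouble n = n := by
  unfold pvRoundDouble
  split_ifs with hle hc
  · rfl
  · -- rounding branch cannot fire: the low k bits of a representable n are zero
    exfalso
    obtain ⟨e, he, hdvd, hlt⟩ := h
    have hb := pvBits_bounds 64 n (by norm_num; omega)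
    have hb54 : 54 ≤ pvBits 64 n := by
      by_contra hb'
      have : (2:Nat) ^ pvBits 64 n ≤ 2 ^ 53 := Nat.pow_le_pow_right (by norm_num) (by omega)
      omega
    have hlow := hb.2 (by omega)
    have hek : pvBits 64 n - 53 ≤ e := by
      have h1 : (2:Nat) ^ (pvBits 64 n - 1) < 2 ^ 53 * 2 ^ e := by omega
      rw [← pow_add] at h1
      have := (Nat.pow_lt_pow_iff_right (a := 2) (by norm_num)).1 h1
      omega
    have hr : n % 2 ^ (pvBits 64 n - 53) = 0 := by
      obtain ⟨c, hc⟩ := dvd_trans (pow_dvd_pow 2 hek) hdvd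
      set K := 2 ^ (pvBits 64 n - 53) with hK
      rw [hc]
      exact Nat.mul_mod_right K c
    have hpos : 0 < (2:Nat) ^ (pvBits 64 n - 53 - 1) := pow_pos (by norm_num) _
    rw [hr] at hc
    rcases hc with hc | hc
    · omega
    · omega
  · -- round-down branch returns n itself
    obtain ⟨e, he, hdvd, hlt⟩ := h
    have hb := pvBits_bounds 64 n (by norm_num; omega)
    have hb54 : 54 ≤ pvBits 64 n := by
      by_contra hb'
      have : (2:Nat) ^ pvBits 64 n ≤ 2 ^ 53 := Nat.pow_le_pow_right (by norm_num) (by omega)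
      omega
    have hlow := hb.2 (by omega)
    have hek : pvBits 64 n - 53 ≤ e := by
      have h1 : (2:Nat) ^ (pvBits 64 n - 1) < 2 ^ 53 * 2 ^ e := by omega
      rw [← pow_add] at h1
      have := (Nat.pow_lt_pow_iff_right (a := 2) (by norm_num)).1 h1
      omega
    exact Nat.div_mul_cancel (dvd_trans (pow_dvd_pow 2 hek) hdvd)

lemma pv_round_rep {n : Nat} (hn : n < 2 ^ 63) (hbig : 2 ^ 53 < n) : pvRep (pvRoundDouble n) := by
  unfold pvRoundDouble
  rw [if_neg (by omega)]
  have hb := pvBits_bounds 64 n (by norm_num; omega)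
  have hb54 : 54 ≤ pvBits 64 n := by
    by_contra hb'
    have : (2:Nat) ^ pvBits 64 n ≤ 2 ^ 53 := Nat.pow_le_pow_right (by norm_num) (by omega)
    omega
  have hb63 : pvBits 64 n ≤ 63 := by
    by_contra hb'
    have : (2:Nat) ^ 63 ≤ 2 ^ (pvBits 64 n - 1) := Nat.pow_le_pow_right (by norm_num) (by omega)
    have := hb.2 (by omega)
    omega
  have hq : n / 2 ^ (pvBits 64 n - 53) < 2 ^ 53 := by
    have hsplit : (2:Nat) ^ pvBits 64 n = 2 ^ 53 * 2 ^ (pvBits 64 n - 53) := by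
      rw [← pow_add]
      congr 1
      omega
    have := hb.1
    exact Nat.div_lt_of_lt_mul (by omega)
  split_ifs with hc
  · rcases Nat.lt_or_ge (n / 2 ^ (pvBits 64 n - 53) + 1) (2 ^ 53) with hq1 | hq1
    · exact ⟨pvBits 64 n - 53, by omega, dvd_mul_left _ _,
        mul_lt_mul_of_pos_right hq1 (pow_pos (by norm_num) _)⟩
    · have hq2 : n / 2 ^ (pvBits 64 n - 53) + 1 = 2 ^ 53 := by omega
      rw [hq2]
      refine ⟨pvBits 64 n - 53 + 1, by omega, ⟨2 ^ 52, ?_⟩, ?_⟩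
      · rw [← pow_add, ← pow_add]
        congr 1
        omega
      · have h1 : (2:Nat) ^ 53 * 2 ^ (pvBits 64 n - 53) < 2 ^ 53 * 2 ^ (pvBits 64 n - 53 + 1) := by
          have : (2:Nat) ^ (pvBits 64 n - 53 + 1) = 2 ^ (pvBits 64 n - 53) * 2 := pow_succ 2 _
          have hp : 0 < (2:Nat) ^ (pvBits 64 n - 53) := pow_pos (by norm_num) _
          nlinarith
        exact h1
  · exact ⟨pvBits 64 n - 53, by omega, dvd_mul_left _ _,
      mul_lt_mul_of_pos_right hq (pow_pos (by norm_num) _)⟩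

lemma pv_round_even {n : Nat} (hn : n < 2 ^ 63) (hbig : 2 ^ 53 < n) :
    pvRoundDouble n % 2 = 0 := by
  unfold pvRoundDouble
  rw [if_neg (by omega)]
  have hb := pvBits_bounds 64 n (by norm_num; omega)
  have hb54 : 54 ≤ pvBits 64 n := by
    by_contra hb'
    have : (2:Nat) ^ pvBits 64 n ≤ 2 ^ 53 := Nat.pow_le_pow_right (by norm_num) (by omega)
    omega
  have hs : (2:Nat) ^ (pvBits 64 n - 53) = 2 ^ (pvBits 64 n - 53 - 1) * 2 := by
    have h1 := pow_succ 2 (pvBits 64 n - 53 - 1)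
    have he : pvBits 64 n - 53 - 1 + 1 = pvBits 64 n - 53 := by omega
    rw [he] at h1
    exact h1
  split_ifs
  · rw [hs, ← Nat.mul_assoc]
    exact Nat.mul_mod_left _ 2
  · rw [hs, ← Nat.mul_assoc]
    exact Nat.mul_mod_left _ 2

-- Dom bound: |nb_series| ≤ 2^31 keeps the product below 2^63
lemma pv_prod_lt (n : Int) (h1 : -2147483648 ≤ n) (h2 : n ≤ 2147483648) :
    n * (n - 1) < 2 ^ 63 := by
  nlinarith [mul_nonneg (by omega : (0:Int) ≤ 2147483648 - n)
    (by omega : (0:Int) ≤ n + 2147483648)]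

lemma pv_dom_bounds (nb : Int) (hdom : Dom_distance_matrix_length_py none nb) :
    -2147483648 ≤ nb ∧ nb ≤ 2147483648 := by
  simpa [Dom_distance_matrix_length_py, pvDomInt] using hdom

theorem pv_none_eq (n : Int) (h1 : -2147483648 ≤ n) (h2 : n ≤ 2147483648)
    (h : ∃ e ∈ Finset.range 64, ((2:Int) ^ e ∣ n * (n - 1) ∧ n * (n - 1) < 2 ^ 53 * 2 ^ e)) :
    distance_matrix_length_py none n = distance_matrix_length_py_alt none n := by
  show Int.tdiv ((pvRoundDouble (n * (n - 1)).toNat : Nat) : Int) 2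
      = PySem.Int.floordiv (n * (n - 1)) 2
  have hnn := pv_prod_nonneg n
  have hbound := pv_prod_lt n h1 h2
  have hcast : (((n * (n - 1)).toNat : Nat) : Int) = n * (n - 1) := Int.toNat_of_nonneg hnn
  have hrep : pvRep (n * (n - 1)).toNat := by
    obtain ⟨e, he, hdvd, hlt⟩ := h
    rw [Finset.mem_range] at he
    refine ⟨e, he, ?_, ?_⟩
    · have h2e : ((2:Int) ^ e) = ((2 ^ e : Nat) : Int) := by push_cast; ring
      rw [h2e, ← hcast] at hdvd
      exact_mod_cast hdvd
    · rw [← hcast] at hlt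
      exact_mod_cast hlt
  have hround : pvRoundDouble (n * (n - 1)).toNat = (n * (n - 1)).toNat :=
    pv_round_eq_of_rep (by omega) hrep
  rw [hround, hcast]
  have hev := pv_prod_even n
  rw [PySem.Int.floordiv_eq_ediv_of_pos (by norm_num), Int.tdiv_eq_ediv_of_dvd (by omega)]

-- ===== VERDICT (by name: the statement is the Claim_ definition above) =====
theorem distance_matrix_length_py_spec : Claim_unchanged_distance_matrix_length_py := by
  intro block nb_series hdom hnd
  match block with
  | none =>
    obtain ⟨h1, h2⟩ := pv_dom_bounds nb_series hdom
    have h : ∃ e ∈ Finset.range 64,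
        ((2:Int) ^ e ∣ nb_series * (nb_series - 1) ∧
          nb_series * (nb_series - 1) < 2 ^ 53 * 2 ^ e) := by
      by_contra hc
      exact hnd ⟨rfl, hc⟩
    exact pv_none_eq nb_series h1 h2 h
  | some b =>
    obtain ⟨⟨rb, re⟩, cb, ce⟩ := b
    have h1 := (pv_args_irrel ((rb, re), (cb, ce)) nb_series 0).1
    have h2 := (pv_args_irrel ((rb, re), (cb, ce)) nb_series 0).2
    rw [h2, h1, pv_some_eq]

theorem distance_matrix_length_py_changed : Claim_changed_distance_matrix_length_py := by
  unfold Claim_changed_distance_matrix_length_py; decide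

theorem distance_matrix_length_py_tight : Claim_exact_distance_matrix_length_py := by
  intro block nb hdom hD
  obtain ⟨hb, hnr⟩ := hD
  subst hb
  obtain ⟨h1, h2⟩ := pv_dom_bounds nb hdom
  have hnn := pv_prod_nonneg nb
  have hbound := pv_prod_lt nb h1 h2
  have hcast : (((nb * (nb - 1)).toNat : Nat) : Int) = nb * (nb - 1) := Int.toNat_of_nonneg hnn
  have hev := pv_prod_even nb
  have hevN : (nb * (nb - 1)).toNat % 2 = 0 := by omega
  have hltN : (nb * (nb - 1)).toNat < 2 ^ 63 := by omega
  have hnrep : ¬ pvRep (nb * (nb - 1)).toNat := by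
    intro hrep
    obtain ⟨e, he, hdvd, hlt⟩ := hrep
    refine hnr ⟨e, Finset.mem_range.2 he, ?_, ?_⟩
    · have h2e : ((2:Int) ^ e) = ((2 ^ e : Nat) : Int) := by push_cast; ring
      rw [h2e, ← hcast]
      exact_mod_cast hdvd
    · rw [← hcast]
      exact_mod_cast hlt
  have hbig : 2 ^ 53 < (nb * (nb - 1)).toNat := by
    by_contra hsm
    exact hnrep (pvRep_of_small (by omega) hevN)
  have hrepR := pv_round_rep hltN hbig
  have hne : pvRoundDouble (nb * (nb - 1)).toNat ≠ (nb * (nb - 1)).toNat := by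
    intro heq
    exact hnrep (heq ▸ hrepR)
  have hevR := pv_round_even hltN hbig
  show Int.tdiv ((pvRoundDouble (nb * (nb - 1)).toNat : Nat) : Int) 2
      ≠ PySem.Int.floordiv (nb * (nb - 1)) 2
  rw [PySem.Int.floordiv_eq_ediv_of_pos (by norm_num), Int.tdiv_eq_ediv_of_dvd (by omega)]
  intro heq
  have : pvRoundDouble (nb * (nb - 1)).toNat = (nb * (nb - 1)).toNat := by omega
  exact hne this
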